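-- pv_equiv track=rewrite | github.com/Rehan000/crossview-dataset | scripts/fetch_mapillary.py | pick_thumb
-- ===== SOURCE A (Python) =====
-- from typing import Iterable, Optional, Tuple, List
--
-- def pick_thumb(record: dict, target: int) -> Optional[str]:
--     """
--     Choose the closest thumbnail <= target (2048, 1024, 256).
--     If none <= target exist, fall back to the smallest available.
--     """
--     order = [2048, 1024, 256]
--     fields = {256: "thumb_256_url", 1024: "thumb_1024_url", 2048: "thumb_2048_url"}
--     for sz in order:
--         if sz <= target and record.get(fields[sz]):
--             return record[fields[sz]]
--     for sz in reversed(order):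
--         if record.get(fields[sz]):
--             return record[fields[sz]]
--     return None
-- ===== SOURCE B (Python) =====
-- def pick_thumb(record: dict, target: int):
--     """
--     Choose the closest thumbnail <= target (2048, 1024, 256).
--     If none <= target exist, fall back to the smallest available.
--     """
--     fields = {256: "thumb_256_url", 1024: "thumb_1024_url", 2048: "thumb_2048_url"}
--     available = {sz: record[fields[sz]] for sz in (256, 1024, 2048) if record.get(fields[sz])}
--     if not available:
--         return None
--     candidates = [s for s in available if s <= target]
--     return available[max(candidates)] if candidates else available[min(available)]
-- ===== Notes on version B (the rewrite author's own statement) =====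
-- stated objective: simpler
-- what changed: Replaces A's two ordered short-circuit scans (descending then ascending) by building the map of actually-available sizes once and selecting with max over sizes <= target, falling back to min of available.
import Mathlib
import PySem

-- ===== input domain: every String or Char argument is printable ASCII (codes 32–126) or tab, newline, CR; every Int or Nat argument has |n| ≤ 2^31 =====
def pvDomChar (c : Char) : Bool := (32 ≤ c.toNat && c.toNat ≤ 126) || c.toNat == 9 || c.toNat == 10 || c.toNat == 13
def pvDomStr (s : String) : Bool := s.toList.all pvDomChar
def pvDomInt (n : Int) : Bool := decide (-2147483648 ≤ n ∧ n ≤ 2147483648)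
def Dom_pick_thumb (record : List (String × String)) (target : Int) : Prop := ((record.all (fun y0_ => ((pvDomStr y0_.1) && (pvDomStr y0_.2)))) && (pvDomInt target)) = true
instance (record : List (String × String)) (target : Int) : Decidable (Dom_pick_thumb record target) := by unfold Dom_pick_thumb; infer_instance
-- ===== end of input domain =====

-- B is a simpler decomposition of the same selection: build the available-size map once, then pick by max/min.

-- ===== PORT A =====
-- fields[sz] for the three sizes A/B use
def pt_fields (sz : Int) : String :=
  if sz = 256 then "thumb_256_url" else if sz = 1024 then "thumb_1024_url" else "thumb_2048_url"

-- record.get(fields[sz]) with Python truthiness: some v only when present and non-empty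
def pt_tget (record : List (String × String)) (k : String) : Option String :=
  match PySem.Dict.get? (PySem.Dict.mk record) k with
  | some v => if v = "" then none else some v
  | none => none

def pick_thumb (record : List (String × String)) (target : Int) : Option String :=
  let order : List Int := [2048, 1024, 256]
  -- first loop: return record[fields[sz]] when sz <= target and the value is truthy
  match order.findSome? (fun sz => if sz ≤ target then pt_tget record (pt_fields sz) else none) with
  | some v => some v
  | none =>
    -- second loop over reversed(order): first truthy value
    match order.reverse.findSome? (fun sz => pt_tget record (pt_fields sz)) with
    | some v => some v
    | none => none

-- ===== PORT B =====
def pick_thumb_alt (record : List (String × String)) (target : Int) : Option String :=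
  let available : PySem.Dict Int String :=
    ([256, 1024, 2048] : List Int).foldl (fun d sz =>
      match pt_tget record (pt_fields sz) with
      | some v => PySem.Dict.insert d sz v
      | none => d) PySem.Dict.empty
  if available.items = [] then none
  else
    let candidates := available.keys.filter (fun s => decide (s ≤ target))
    match PySem.List.max? candidates (fun x => x) with
    | some m => PySem.Dict.get? available m
    | none =>
      match PySem.List.min? available.keys (fun x => x) with
      | some m => PySem.Dict.get? available m
      | none => none

-- ===== PRECONDITION & SPEC =====
def Spec_pick_thumb (record : List (String × String)) (target : Int) (out : Option String) : Prop := out = pick_thumb_alt record target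
instance (record : List (String × String)) (target : Int) (out : Option String) : Decidable (Spec_pick_thumb record target out) := by unfold Spec_pick_thumb; infer_instance

-- ===== CLAIM (what is proved, stated in full; the proofs are below) =====
def Claim_equal_pick_thumb : Prop := ∀ (record : List (String × String)) (target : Int), Dom_pick_thumb record target → Spec_pick_thumb record target (pick_thumb record target)

-- ===== LEMMAS AND PROOFS =====

-- ===== VERDICT (by name: the statement is the Claim_ definition above) =====
theorem pick_thumb_spec : Claim_equal_pick_thumb := by
  intro record target _
  unfold Spec_pick_thumb pick_thumb pick_thumb_alt
  rcases h256 : pt_tget record (pt_fields 256) with _ | v256 <;>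
  rcases h1024 : pt_tget record (pt_fields 1024) with _ | v1024 <;>
  rcases h2048 : pt_tget record (pt_fields 2048) with _ | v2048 <;>
  by_cases t256 : (256 : Int) ≤ target <;>
  by_cases t1024 : (1024 : Int) ≤ target <;>
  by_cases t2048 : (2048 : Int) ≤ target <;>
  simp_all [pt_fields, PySem.Dict.insert, PySem.Dict.get?, PySem.Dict.empty, PySem.Dict.keys,
    PySem.List.max?, PySem.List.min?, List.findSome?] <;>
  (try (split_ifs <;> simp_all)) <;>
  omega
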